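-- pv_equiv track=rewrite | github.com/BrunoTeixeira1996/network-scripts | script.py | getBitsSubnet
-- ===== SOURCE A (Python) =====
-- def getBitsSubnet(network: list) -> list:
--
--     for i in network:
--         if i['network_host_number'] == 1:
--             i['network_bits'] = 0
--         elif i['network_host_number'] == 2:
--             i['network_bits'] = 2
--         elif i['network_host_number'] >= 3 and i['network_host_number'] <= 6:
--             i['network_bits'] = 3
--         elif i['network_host_number'] >= 7 and i['network_host_number'] <= 14:
--             i['network_bits'] = 4
--         elif i['network_host_number'] >= 15 and i['network_host_number'] <= 30:
--             i['network_bits'] = 5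
--         elif i['network_host_number'] >= 31 and i['network_host_number'] <= 62:
--             i['network_bits'] = 6
--         elif i['network_host_number'] >= 63 and i['network_host_number'] <= 126:
--             i['network_bits'] = 7
--         elif i['network_host_number'] >= 127 and i['network_host_number'] <= 254:
--             i['network_bits'] = 8
--         elif i['network_host_number'] >= 255 and i['network_host_number'] <= 510:
--             i['network_bits'] = 9
--         elif i['network_host_number'] >= 511 and i['network_host_number'] <= 1022:
--             i['network_bits'] = 10
--     return network
-- ===== SOURCE B (Python) =====
-- def getBitsSubnet(network: list) -> list:
--     # Same in-place update, but the if/elif bracket chain is replaced by the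
--     # closed form (h + 1).bit_length() on the guarded range 2..1022.
--     for i in network:
--         h = i['network_host_number']
--         if h == 1:
--             i['network_bits'] = 0
--         elif 2 <= h <= 1022:
--             i['network_bits'] = (h + 1).bit_length()
--     return network
-- ===== Notes on version B (the rewrite author's own statement) =====
-- stated objective: simpler
-- what changed: The ten-branch if/elif bracket chain is replaced by the closed form (h+1).bit_length() on the guarded range 2..1022 (plus the h==1 special case), exploiting that each bracket is a power-of-two interval.
import Mathlib
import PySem

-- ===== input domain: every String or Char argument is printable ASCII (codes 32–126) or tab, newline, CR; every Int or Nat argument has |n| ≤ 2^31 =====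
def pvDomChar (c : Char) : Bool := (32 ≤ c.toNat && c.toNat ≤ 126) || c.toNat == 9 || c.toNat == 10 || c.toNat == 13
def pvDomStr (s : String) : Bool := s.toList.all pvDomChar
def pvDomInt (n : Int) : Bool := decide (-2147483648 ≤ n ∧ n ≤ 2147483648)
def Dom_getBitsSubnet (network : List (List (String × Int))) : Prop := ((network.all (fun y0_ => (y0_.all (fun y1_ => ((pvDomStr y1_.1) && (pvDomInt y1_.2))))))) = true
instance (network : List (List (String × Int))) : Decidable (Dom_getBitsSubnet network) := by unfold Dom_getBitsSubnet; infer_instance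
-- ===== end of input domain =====

-- B replaces A's ten-branch if/elif bracket chain by the closed form (h+1).bit_length()
-- on the guarded range 2..1022.  Both Pythons mutate the dicts in place and return the
-- same list; the equivalence proved here is about the return value.

-- ===== PORT A =====
-- Literal transliteration: each dict is built (dict semantics: last duplicate wins),
-- the key is looked up (none = KeyError, excluded by Pre_; the dict is then returned
-- unchanged), and the if/elif chain assigns network_bits.
def getBitsSubnet (network : List (List (String × Int))) : List (List (String × Int)) :=
  network.map (fun i =>
    let d := PySem.Dict.ofList i
    match d.get? "network_host_number" with
    | none => d.items
    | some h =>
      if h = 1 then (d.insert "network_bits" 0).items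
      else if h = 2 then (d.insert "network_bits" 2).items
      else if 3 ≤ h ∧ h ≤ 6 then (d.insert "network_bits" 3).items
      else if 7 ≤ h ∧ h ≤ 14 then (d.insert "network_bits" 4).items
      else if 15 ≤ h ∧ h ≤ 30 then (d.insert "network_bits" 5).items
      else if 31 ≤ h ∧ h ≤ 62 then (d.insert "network_bits" 6).items
      else if 63 ≤ h ∧ h ≤ 126 then (d.insert "network_bits" 7).items
      else if 127 ≤ h ∧ h ≤ 254 then (d.insert "network_bits" 8).items
      else if 255 ≤ h ∧ h ≤ 510 then (d.insert "network_bits" 9).items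
      else if 511 ≤ h ∧ h ≤ 1022 then (d.insert "network_bits" 10).items
      else d.items)

-- ===== PORT B =====
-- Literal transliteration of Source B; (h+1).bit_length() is PySem.Int.bitLength (h+1).
def getBitsSubnet_alt (network : List (List (String × Int))) : List (List (String × Int)) :=
  network.map (fun i =>
    let d := PySem.Dict.ofList i
    match d.get? "network_host_number" with
    | none => d.items
    | some h =>
      if h = 1 then (d.insert "network_bits" 0).items
      else if 2 ≤ h ∧ h ≤ 1022 then
        (d.insert "network_bits" ((PySem.Int.bitLength (h + 1) : Int))).items
      else d.items)

-- ===== PRECONDITION & SPEC =====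
-- Pre_ excludes exactly the inputs where a dict lacks the key 'network_host_number':
-- there both Pythons raise KeyError.
def Pre_getBitsSubnet (network : List (List (String × Int))) : Prop :=
  (network.all (fun i => i.any (fun p => p.1 == "network_host_number"))) = true
instance (network : List (List (String × Int))) : Decidable (Pre_getBitsSubnet network) := by unfold Pre_getBitsSubnet; infer_instance

def pvWitness_getBitsSubnet : (List (List (String × Int))) := [[("network_host_number", 5)]]

def Spec_getBitsSubnet (network : List (List (String × Int))) (out : List (List (String × Int))) : Prop := out = getBitsSubnet_alt network
instance (network : List (List (String × Int))) (out : List (List (String × Int))) : Decidable (Spec_getBitsSubnet network out) := by unfold Spec_getBitsSubnet; infer_instance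

-- ===== CLAIM (what is proved, stated in full; the proofs are below) =====
def Claim_equal_getBitsSubnet : Prop := ∀ (network : List (List (String × Int))), Dom_getBitsSubnet network → Pre_getBitsSubnet network → Spec_getBitsSubnet network (getBitsSubnet network)

-- ===== LEMMAS AND PROOFS =====

-- bit_length pinned by a power-of-two sandwich
theorem bitLength_eq_of_bounds (n : Int) (k : Nat) (hk : 1 ≤ k)
    (h1 : 2 ^ (k - 1) ≤ n.natAbs) (h2 : n.natAbs < 2 ^ k) :
    PySem.Int.bitLength n = k := by
  have hn : n ≠ 0 := by
    have : 0 < 2 ^ (k - 1) := Nat.pow_pos (by omega)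
    omega
  have hb1 := PySem.Int.two_pow_bitLength_le n hn
  have hb2 := PySem.Int.lt_two_pow_bitLength n
  set L := PySem.Int.bitLength n with hL
  rcases lt_trichotomy L k with h | h | h
  · have : (2 : Nat) ^ L ≤ 2 ^ (k - 1) := Nat.pow_le_pow_right (by omega) (by omega)
    omega
  · exact h
  · have : (2 : Nat) ^ k ≤ 2 ^ (L - 1) := Nat.pow_le_pow_right (by omega) (by omega)
    omega

theorem getBitsSubnet_elem_eq (i : List (String × Int)) :
    (let d := PySem.Dict.ofList i
     match d.get? "network_host_number" with
     | none => d.items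
     | some h =>
       if h = 1 then (d.insert "network_bits" 0).items
       else if h = 2 then (d.insert "network_bits" 2).items
       else if 3 ≤ h ∧ h ≤ 6 then (d.insert "network_bits" 3).items
       else if 7 ≤ h ∧ h ≤ 14 then (d.insert "network_bits" 4).items
       else if 15 ≤ h ∧ h ≤ 30 then (d.insert "network_bits" 5).items
       else if 31 ≤ h ∧ h ≤ 62 then (d.insert "network_bits" 6).items
       else if 63 ≤ h ∧ h ≤ 126 then (d.insert "network_bits" 7).items
       else if 127 ≤ h ∧ h ≤ 254 then (d.insert "network_bits" 8).items
       else if 255 ≤ h ∧ h ≤ 510 then (d.insert "network_bits" 9).items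
       else if 511 ≤ h ∧ h ≤ 1022 then (d.insert "network_bits" 10).items
       else d.items)
    =
    (let d := PySem.Dict.ofList i
     match d.get? "network_host_number" with
     | none => d.items
     | some h =>
       if h = 1 then (d.insert "network_bits" 0).items
       else if 2 ≤ h ∧ h ≤ 1022 then
         (d.insert "network_bits" ((PySem.Int.bitLength (h + 1) : Int))).items
       else d.items) := by
  set d := PySem.Dict.ofList i
  cases hg : d.get? "network_host_number" with
  | none => simp only [hg]
  | some h =>
    simp only [hg]
    by_cases e1 : h = 1
    · simp [e1]
    by_cases e2 : h = 2
    · have hb : PySem.Int.bitLength 3 = 2 := by decide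
      simp [e2, hb]
    by_cases e3 : 3 ≤ h ∧ h ≤ 6
    · have hb : PySem.Int.bitLength (h + 1) = 3 :=
        bitLength_eq_of_bounds _ 3 (by norm_num) (by norm_num; omega) (by norm_num; omega)
      simp [e1, e2, e3, show 2 ≤ h ∧ h ≤ 1022 by omega, hb]
    by_cases e4 : 7 ≤ h ∧ h ≤ 14
    · have hb : PySem.Int.bitLength (h + 1) = 4 :=
        bitLength_eq_of_bounds _ 4 (by norm_num) (by norm_num; omega) (by norm_num; omega)
      simp [e1, e2, e3, e4, show 2 ≤ h ∧ h ≤ 1022 by omega, hb]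
    by_cases e5 : 15 ≤ h ∧ h ≤ 30
    · have hb : PySem.Int.bitLength (h + 1) = 5 :=
        bitLength_eq_of_bounds _ 5 (by norm_num) (by norm_num; omega) (by norm_num; omega)
      simp [e1, e2, e3, e4, e5, show 2 ≤ h ∧ h ≤ 1022 by omega, hb]
    by_cases e6 : 31 ≤ h ∧ h ≤ 62
    · have hb : PySem.Int.bitLength (h + 1) = 6 :=
        bitLength_eq_of_bounds _ 6 (by norm_num) (by norm_num; omega) (by norm_num; omega)
      simp [e1, e2, e3, e4, e5, e6, show 2 ≤ h ∧ h ≤ 1022 by omega, hb]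
    by_cases e7 : 63 ≤ h ∧ h ≤ 126
    · have hb : PySem.Int.bitLength (h + 1) = 7 :=
        bitLength_eq_of_bounds _ 7 (by norm_num) (by norm_num; omega) (by norm_num; omega)
      simp [e1, e2, e3, e4, e5, e6, e7, show 2 ≤ h ∧ h ≤ 1022 by omega, hb]
    by_cases e8 : 127 ≤ h ∧ h ≤ 254
    · have hb : PySem.Int.bitLength (h + 1) = 8 :=
        bitLength_eq_of_bounds _ 8 (by norm_num) (by norm_num; omega) (by norm_num; omega)
      simp [e1, e2, e3, e4, e5, e6, e7, e8, show 2 ≤ h ∧ h ≤ 1022 by omega, hb]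
    by_cases e9 : 255 ≤ h ∧ h ≤ 510
    · have hb : PySem.Int.bitLength (h + 1) = 9 :=
        bitLength_eq_of_bounds _ 9 (by norm_num) (by norm_num; omega) (by norm_num; omega)
      simp [e1, e2, e3, e4, e5, e6, e7, e8, e9, show 2 ≤ h ∧ h ≤ 1022 by omega, hb]
    by_cases e10 : 511 ≤ h ∧ h ≤ 1022
    · have hb : PySem.Int.bitLength (h + 1) = 10 :=
        bitLength_eq_of_bounds _ 10 (by norm_num) (by norm_num; omega) (by norm_num; omega)
      simp [e1, e2, e3, e4, e5, e6, e7, e8, e9, e10, show 2 ≤ h ∧ h ≤ 1022 by omega, hb]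
    · simp [e1, e2, e3, e4, e5, e6, e7, e8, e9, e10, show ¬(2 ≤ h ∧ h ≤ 1022) by omega]

theorem getBitsSubnet_spec : Claim_equal_getBitsSubnet := by
  intro network _ _
  unfold Spec_getBitsSubnet getBitsSubnet getBitsSubnet_alt
  exact List.map_congr_left (fun i _ => getBitsSubnet_elem_eq i)
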